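-- pv_equiv track=rewrite | github.com/gabrielgmendonca/isabel-wiki | scripts/backfill_direitos.py | insert_direitos
-- ===== SOURCE A (Python) =====
-- def insert_direitos(lines: list[str], block: list[str]) -> list[str] | None:
--     """Insere o bloco direitos: antes de `atualizado_em:` no frontmatter.
--
--     Retorna nova lista, ou None se não foi possível inserir (frontmatter mal formado).
--     """
--     in_fm = False
--     insert_at: int | None = None
--     fm_end: int | None = None
--     for i, line in enumerate(lines):
--         stripped = line.strip()
--         if stripped == "---":
--             if in_fm:
--                 fm_end = i
--                 break
--             in_fm = True
--             continue
--         if in_fm and line and line[0] not in (" ", "\t") and stripped.startswith("atualizado_em:"):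
--             insert_at = i
--             break
--
--     if insert_at is None:
--         # Sem atualizado_em: inserir antes do --- de fechamento
--         if fm_end is None:
--             return None
--         insert_at = fm_end
--
--     return lines[:insert_at] + block + lines[insert_at:]
-- ===== SOURCE B (Python) =====
-- def insert_direitos(lines: list[str], block: list[str]) -> list[str] | None:
--     # Three sequential scans instead of a one-pass state machine:
--     # 1) opening marker, 2) closing marker, 3) atualizado_em: within the body.
--     s = None
--     for i, l in enumerate(lines):
--         if l.strip() == "---":
--             s = i
--             break
--     if s is None:
--         return None
--     tail = lines[s + 1:]
--     e = None
--     for j, l in enumerate(tail):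
--         if l.strip() == "---":
--             e = j
--             break
--     body = tail if e is None else tail[:e]
--     ins = None
--     for j, l in enumerate(body):
--         if l and l[0] not in (" ", "\t") and l.strip().startswith("atualizado_em:"):
--             ins = j
--             break
--     if ins is not None:
--         k = s + 1 + ins
--     elif e is not None:
--         k = s + 1 + e
--     else:
--         return None
--     return lines[:k] + block + lines[k:]
-- ===== Notes on version B (the rewrite author's own statement) =====
-- stated objective: alternative
-- what changed: Replaces A's single enumerate loop with in_fm/insert_at/fm_end state by three independent find-first scans (opening marker, closing marker, atualizado_em: line within the body) combined at the end.
import Mathlib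
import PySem

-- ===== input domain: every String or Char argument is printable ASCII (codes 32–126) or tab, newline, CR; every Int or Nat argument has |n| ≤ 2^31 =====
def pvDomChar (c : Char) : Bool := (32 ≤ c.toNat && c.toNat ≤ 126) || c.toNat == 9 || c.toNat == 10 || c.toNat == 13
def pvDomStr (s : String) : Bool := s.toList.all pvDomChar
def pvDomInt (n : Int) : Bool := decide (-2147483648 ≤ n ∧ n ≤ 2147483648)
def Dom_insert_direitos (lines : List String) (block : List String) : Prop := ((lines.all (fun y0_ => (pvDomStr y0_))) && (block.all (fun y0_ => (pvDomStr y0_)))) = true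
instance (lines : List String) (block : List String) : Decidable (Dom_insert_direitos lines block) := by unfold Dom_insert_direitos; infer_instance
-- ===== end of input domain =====

-- B replaces A's single state-machine pass (in_fm/insert_at/fm_end) by three independent
-- find-first scans combined at the end; same O(n) cost, different decomposition.

-- ===== PORT A =====
-- `line and line[0] not in (" ", "\t")` : nonempty and first char not space/tab
def headOkA (line : String) : Bool :=
  match line.toList with
  | [] => false
  | c :: _ => !(c == ' ' || c == '\t')

-- the `for i, line in enumerate(lines)` loop with its in_fm state; returns (insert_at, fm_end)
-- (stripped = line.strip() is recomputed instead of let-bound: same value)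
def loopA : Nat → List String → Bool → Option Nat × Option Nat
  | _, [], _ => (none, none)
  | i, line :: rest, in_fm =>
    if PySem.Str.strip line == "---" then
      if in_fm then (none, some i)
      else loopA (i+1) rest true
    else if in_fm && headOkA line && PySem.Str.startswith (PySem.Str.strip line) "atualizado_em:" then
      (some i, none)
    else loopA (i+1) rest in_fm

def insert_direitos (lines : List String) (block : List String) : Option (List String) :=
  match loopA 0 lines false with
  -- insert_at is a Nat index ≤ len(lines), so the Python slices lines[:k]/lines[k:] are take/drop
  | (some k, _) => some (lines.take k ++ block ++ lines.drop k)
  | (none, some k) => some (lines.take k ++ block ++ lines.drop k)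
  | (none, none) => none

-- ===== PORT B =====
-- `l and l[0] not in (" ", "\t")` again (B's own copy of the check)
def headOkB (l : String) : Bool :=
  match l.toList with
  | [] => false
  | c :: _ => !(c == ' ' || c == '\t')

-- find-first loop (index j from enumerate) for a line whose strip() == "---"
def findMarkerB : Nat → List String → Option Nat
  | _, [] => none
  | j, l :: rest => if PySem.Str.strip l == "---" then some j else findMarkerB (j+1) rest

-- find-first loop for `l and l[0] not in (" ", "\t") and l.strip().startswith("atualizado_em:")`
def findAtualB : Nat → List String → Option Nat
  | _, [] => none
  | j, l :: rest =>
    if headOkB l && PySem.Str.startswith (PySem.Str.strip l) "atualizado_em:" then some j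
    else findAtualB (j+1) rest

def insert_direitos_alt (lines : List String) (block : List String) : Option (List String) :=
  match findMarkerB 0 lines with
  | none => none
  | some s =>
    let tail := lines.drop (s+1)      -- lines[s+1:], s+1 ≥ 0
    let e := findMarkerB 0 tail
    let body := match e with | none => tail | some m => tail.take m   -- tail[:e]
    match findAtualB 0 body with
    | some j => some (lines.take (s+1+j) ++ block ++ lines.drop (s+1+j))
    | none =>
      match e with
      | some m => some (lines.take (s+1+m) ++ block ++ lines.drop (s+1+m))
      | none => none

-- ===== PRECONDITION & SPEC =====
def Spec_insert_direitos (lines : List String) (block : List String) (out : Option (List String)) : Prop := out = insert_direitos_alt lines block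
instance (lines : List String) (block : List String) (out : Option (List String)) : Decidable (Spec_insert_direitos lines block out) := by unfold Spec_insert_direitos; infer_instance

-- ===== CLAIM (what is proved, stated in full; the proofs are below) =====
def Claim_equal_insert_direitos : Prop := ∀ (lines : List String) (block : List String), Dom_insert_direitos lines block → Spec_insert_direitos lines block (insert_direitos lines block)

-- ===== LEMMAS AND PROOFS =====

lemma headOkB_eq : headOkB = headOkA := rfl

lemma findMarkerB_shift (l : List String) (j : Nat) :
    findMarkerB j l = (findMarkerB 0 l).map (j + ·) := by
  induction l generalizing j with
  | nil => simp [findMarkerB]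
  | cons x r ih =>
    by_cases h : (PySem.Str.strip x == "---") = true
    · rw [findMarkerB, findMarkerB, if_pos h, if_pos h]; rfl
    · rw [findMarkerB, findMarkerB, if_neg h, if_neg h, ih (j+1), ih 1]
      cases findMarkerB 0 r with
      | none => rfl
      | some s => simp only [Option.map_some]; congr 1; omega

lemma findAtualB_shift (l : List String) (j : Nat) :
    findAtualB j l = (findAtualB 0 l).map (j + ·) := by
  induction l generalizing j with
  | nil => simp [findAtualB]
  | cons x r ih =>
    by_cases h : (headOkB x && PySem.Str.startswith (PySem.Str.strip x) "atualizado_em:") = true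
    · rw [findAtualB, findAtualB, if_pos h, if_pos h]; rfl
    · rw [findAtualB, findAtualB, if_neg h, if_neg h, ih (j+1), ih 1]
      cases findAtualB 0 r with
      | none => rfl
      | some s => simp only [Option.map_some]; congr 1; omega

-- A's loop before the opening marker: nothing can fire until the first "---"
lemma loopA_false (l : List String) (i : Nat) :
    loopA i l false =
      match findMarkerB 0 l with
      | none => (none, none)
      | some s => loopA (i+s+1) (l.drop (s+1)) true := by
  induction l generalizing i with
  | nil => rfl
  | cons x r ih =>
    by_cases h : (PySem.Str.strip x == "---") = true
    · rw [loopA, findMarkerB, if_pos h, if_pos h]; rfl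
    · rw [loopA, findMarkerB, if_neg h, if_neg h]
      simp only [Bool.false_and, Bool.false_eq_true, if_false]
      rw [ih (i+1), findMarkerB_shift r 1]
      cases findMarkerB 0 r with
      | none => rfl
      | some s =>
        simp only [Option.map_some]
        rw [show (1:Nat) + s = s + 1 by omega, List.drop_succ_cons,
            show i + (s + 1) + 1 = i + 1 + s + 1 by omega]

-- A's loop inside the frontmatter, versus the two independent scans
lemma loopA_true (l : List String) (t : Nat) :
    loopA t l true =
      match findAtualB 0 l, findMarkerB 0 l with
      | some j, none => (some (t+j), none)
      | some j, some m => if j < m then (some (t+j), none) else (none, some (t+m))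
      | none, some m => (none, some (t+m))
      | none, none => (none, none) := by
  induction l generalizing t with
  | nil => rfl
  | cons x r ih =>
    by_cases hm : (PySem.Str.strip x == "---") = true
    · rw [loopA, if_pos hm, if_pos rfl, findMarkerB, if_pos hm, findAtualB]
      by_cases hc : (headOkB x && PySem.Str.startswith (PySem.Str.strip x) "atualizado_em:") = true
      · rw [if_pos hc]
        simp
      · rw [if_neg hc, findAtualB_shift r 1]
        cases findAtualB 0 r with
        | none => rfl
        | some j =>
          simp only [Option.map_some]
          rw [if_neg (by omega)]
          simp
    · rw [loopA, if_neg hm, findMarkerB, if_neg hm, findAtualB, findMarkerB_shift r 1]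
      by_cases ha : (headOkB x && PySem.Str.startswith (PySem.Str.strip x) "atualizado_em:") = true
      · rw [if_pos (by simpa [headOkB_eq, Bool.true_and] using ha), if_pos ha]
        cases findMarkerB 0 r with
        | none => simp
        | some m =>
          simp only [Option.map_some]
          rw [if_pos (by omega)]
          simp
      · rw [if_neg (by simpa [headOkB_eq, Bool.true_and] using ha), if_neg ha]
        rw [ih (t+1), findAtualB_shift r 1]
        cases hj : findAtualB 0 r with
        | none =>
          cases findMarkerB 0 r with
          | none => rfl
          | some m =>
            show ((none, some (t+1+m)) : Option Nat × Option Nat) = (none, some (t+(1+m)))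
            rw [show t + (1+m) = t+1+m by omega]
        | some j =>
          cases findMarkerB 0 r with
          | none =>
            show ((some (t+1+j), none) : Option Nat × Option Nat) = (some (t+(1+j)), none)
            rw [show t + (1+j) = t+1+j by omega]
          | some m =>
            simp only [Option.map_some]
            by_cases hlt : j < m
            · rw [if_pos hlt, if_pos (by omega)]
              show ((some (t+1+j), none) : Option Nat × Option Nat) = (some (t+(1+j)), none)
              rw [show t + (1+j) = t+1+j by omega]
            · rw [if_neg hlt, if_neg (by omega)]
              show ((none, some (t+1+m)) : Option Nat × Option Nat) = (none, some (t+(1+m)))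
              rw [show t + (1+m) = t+1+m by omega]

-- searching the truncated body tail[:m] versus searching all of tail
lemma findAtualB_take (l : List String) (m : Nat) :
    findAtualB 0 (l.take m) =
      match findAtualB 0 l with
      | some j => if j < m then some j else none
      | none => none := by
  induction l generalizing m with
  | nil => simp [findAtualB]
  | cons x r ih =>
    cases m with
    | zero =>
      simp only [List.take_zero]
      cases h : findAtualB 0 (x :: r) with
      | none => rfl
      | some j => simp [findAtualB]
    | succ m' =>
      simp only [List.take_succ_cons]
      by_cases ha : (headOkB x && PySem.Str.startswith (PySem.Str.strip x) "atualizado_em:") = true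
      · rw [findAtualB, findAtualB, if_pos ha, if_pos ha]
        simp
      · rw [findAtualB, findAtualB, if_neg ha, if_neg ha]
        rw [findAtualB_shift r 1, findAtualB_shift (r.take m') 1, ih m']
        cases findAtualB 0 r with
        | none => rfl
        | some j =>
          show Option.map (fun x => 1 + x) (if j < m' then some j else none) =
            (if 1 + j < m' + 1 then some (1 + j) else none)
          by_cases hlt : j < m'
          · rw [if_pos hlt, if_pos (by omega)]
            rfl
          · rw [if_neg hlt, if_neg (by omega)]
            rfl

-- ===== VERDICT (by name: the statement is the Claim_ definition above) =====
theorem insert_direitos_spec : Claim_equal_insert_direitos := by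
  intro lines block _
  unfold Spec_insert_direitos insert_direitos insert_direitos_alt
  rw [loopA_false]
  cases hs : findMarkerB 0 lines with
  | none => rfl
  | some s =>
    simp only [Nat.zero_add]
    rw [loopA_true]
    cases he : findMarkerB 0 (lines.drop (s+1)) with
    | none =>
      cases ha : findAtualB 0 (lines.drop (s+1)) with
      | none => rfl
      | some j => rfl
    | some m =>
      rw [findAtualB_take]
      cases ha : findAtualB 0 (lines.drop (s+1)) with
      | none => rfl
      | some j =>
        by_cases hlt : j < m
        · simp [hlt]
        · simp [hlt]
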